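-- pv_equiv track=rewrite | github.com/mm3906078/Foobar | Level.2/main.py | generous
-- ===== SOURCE A (Python) =====
-- def generous(lambs):
--     num = 1
--     while True:
--         total = 2**(num) - 1
--         if total <= lambs:
--             num += 1
--         else:
--             num -= 1
--             break
--     return num
-- ===== SOURCE B (Python) =====
-- def generous(lambs):
--     if lambs < 1:
--         return 0
--     return (lambs + 1).bit_length() - 1
-- ===== Notes on version B (the rewrite author's own statement) =====
-- stated objective: simpler
-- what changed: Replaced the incrementing trial loop over powers of two with a closed form via bit_length (the answer is the bit length of lambs+1 minus one), guarding sub-one inputs.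
import Mathlib
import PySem

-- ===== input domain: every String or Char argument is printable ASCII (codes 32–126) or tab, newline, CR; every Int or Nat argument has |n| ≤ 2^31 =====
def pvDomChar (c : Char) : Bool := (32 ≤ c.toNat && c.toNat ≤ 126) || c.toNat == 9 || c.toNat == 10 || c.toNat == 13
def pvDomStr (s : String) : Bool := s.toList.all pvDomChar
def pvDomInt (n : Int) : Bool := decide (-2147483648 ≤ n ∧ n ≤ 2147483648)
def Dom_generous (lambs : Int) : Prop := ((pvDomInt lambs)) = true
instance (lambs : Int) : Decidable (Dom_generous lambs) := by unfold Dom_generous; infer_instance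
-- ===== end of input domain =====

-- B replaces A's incrementing trial loop with the closed form bit_length(lambs+1) - 1 (simpler: no loop).

-- ===== PORT A =====
-- A's while-loop: num only ever increases until 2^num - 1 > lambs, then returns num - 1.
def generousLoop (lambs : Int) (num : Nat) : Int :=
  if (2 : Int) ^ num - 1 ≤ lambs then generousLoop lambs (num + 1)
  else (num : Int) - 1
termination_by (lambs + 2 - 2 ^ num).toNat
decreasing_by
  have h2 : (2 : Int) ^ num < 2 ^ (num + 1) := by
    have : (2 : Int) ^ (num + 1) = 2 ^ num * 2 := pow_succ 2 num
    have hp : (0 : Int) < 2 ^ num := by positivity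
    omega
  omega

def generous (lambs : Int) : Int := generousLoop lambs 1

-- ===== PORT B =====
-- (lambs + 1).bit_length() ported as Nat.size (exactly Python's bit_length on nonnegative ints)
def generous_alt (lambs : Int) : Int :=
  if lambs < 1 then 0
  else (Nat.size (lambs + 1).toNat : Int) - 1

-- ===== PRECONDITION & SPEC =====
def Spec_generous (lambs : Int) (out : Int) : Prop := out = generous_alt lambs
instance (lambs : Int) (out : Int) : Decidable (Spec_generous lambs out) := by unfold Spec_generous; infer_instance

-- ===== CLAIM (what is proved, stated in full; the proofs are below) =====
def Claim_equal_generous : Prop := ∀ (lambs : Int), Dom_generous lambs → Spec_generous lambs (generous lambs)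

-- ===== LEMMAS AND PROOFS =====

lemma loop_eq (lambs : Int) (num : Nat)
    (h : (2 : Int) ^ num ≤ lambs + 1) :
    generousLoop lambs num = (Nat.size (lambs + 1).toNat : Int) - 1 := by
  rw [generousLoop]
  have hcond : (2 : Int) ^ num - 1 ≤ lambs := by omega
  rw [if_pos hcond]
  by_cases h2 : (2 : Int) ^ (num + 1) ≤ lambs + 1
  · exact loop_eq lambs (num + 1) h2
  · rw [generousLoop, if_neg (by omega)]
    -- here 2^num ≤ lambs+1 < 2^(num+1), so size (lambs+1).toNat = num + 1
    have hpos : (0 : Int) < 2 ^ num := by positivity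
    have hL : (0 : Int) < lambs + 1 := by omega
    set L := (lambs + 1).toNat with hLdef
    have hLeq : (lambs + 1) = (L : Int) := by omega
    have hlow : 2 ^ num ≤ L := by
      have := h; rw [hLeq] at this; exact_mod_cast this
    have hhigh : L < 2 ^ (num + 1) := by
      have : lambs + 1 < 2 ^ (num + 1) := by omega
      rw [hLeq] at this; exact_mod_cast this
    have hsize : Nat.size L = num + 1 := by
      have h1 : num < Nat.size L := Nat.lt_size.mpr hlow
      have h2' : Nat.size L ≤ num + 1 := Nat.size_le.mpr hhigh
      omega
    rw [hsize]
termination_by (lambs + 2 - 2 ^ num).toNat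
decreasing_by
  have h2 : (2 : Int) ^ num < 2 ^ (num + 1) := by
    have : (2 : Int) ^ (num + 1) = 2 ^ num * 2 := pow_succ 2 num
    have hp : (0 : Int) < 2 ^ num := by positivity
    omega
  omega

-- ===== VERDICT (by name: the statement is the Claim_ definition above) =====
theorem generous_spec : Claim_equal_generous := by
  intro lambs _
  unfold Spec_generous generous generous_alt
  by_cases h : lambs < 1
  · rw [generousLoop, if_neg (by norm_num; omega), if_pos h]; norm_num
  · rw [if_neg h]
    exact loop_eq lambs 1 (by push_cast; omega)
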